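-- pv_equiv track=rewrite | github.com/windbow27/sfenizer | use_classifier.py | to_sfen
-- ===== SOURCE A (Python) =====
-- SFEN_MAP = {
--     "K_black": "K", "R_black": "R", "B_black": "B", "G_black": "G", "S_black": "S", "N_black": "N", "L_black": "L", "P_black": "P",
--     "+R_black": "+R", "+B_black": "+B", "+S_black": "+S", "+N_black": "+N", "+L_black": "+L", "+P_black": "+P",
--     "K_white": "k", "R_white": "r", "B_white": "b", "G_white": "g", "S_white": "s", "N_white": "n", "L_white": "l", "P_white": "p",
--     "+R_white": "+r", "+B_white": "+b", "+S_white": "+s", "+N_white": "+n", "+L_white": "+l", "+P_white": "+p",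
--     "empty": ""
-- }
--
-- def to_sfen(board, turn="b", hands="-", move_number=1):
--     sfen_rows = []
--     for row in board:
--         row_str = ""
--         empty_count = 0
--         for cell in row:
--             piece = SFEN_MAP.get(cell, "")
--             if piece == "":
--                 empty_count += 1
--             else:
--                 if empty_count > 0:
--                     row_str += str(empty_count)
--                     empty_count = 0
--                 row_str += piece
--         if empty_count > 0:
--             row_str += str(empty_count)
--         sfen_rows.append(row_str)
--     sfen = "/".join(sfen_rows)
--     return f"{sfen} {turn} {hands} {move_number}"
-- ===== SOURCE B (Python) =====
-- SFEN_MAP = {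
--     "K_black": "K", "R_black": "R", "B_black": "B", "G_black": "G", "S_black": "S", "N_black": "N", "L_black": "L", "P_black": "P",
--     "+R_black": "+R", "+B_black": "+B", "+S_black": "+S", "+N_black": "+N", "+L_black": "+L", "+P_black": "+P",
--     "K_white": "k", "R_white": "r", "B_white": "b", "G_white": "g", "S_white": "s", "N_white": "n", "L_white": "l", "P_white": "p",
--     "+R_white": "+r", "+B_white": "+b", "+S_white": "+s", "+N_white": "+n", "+L_white": "+l", "+P_white": "+p",
--     "empty": ""
-- }
--
--
-- def _row_str(row):
--     # map cells to glyphs, then split into maximal runs of empty / non-empty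
--     glyphs = [SFEN_MAP.get(cell, "") for cell in row]
--     parts = []
--     i, n = 0, len(glyphs)
--     while i < n:
--         j = i
--         if glyphs[i] == "":
--             while j < n and glyphs[j] == "":
--                 j += 1
--             parts.append(str(j - i))
--         else:
--             while j < n and glyphs[j] != "":
--                 j += 1
--             parts.append("".join(glyphs[i:j]))
--         i = j
--     return "".join(parts)
--
--
-- def to_sfen(board, turn="b", hands="-", move_number=1):
--     sfen = "/".join(_row_str(row) for row in board)
--     return f"{sfen} {turn} {hands} {move_number}"
-- ===== Notes on version B (the rewrite author's own statement) =====
-- stated objective: alternative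
-- what changed: Replaces the empty_count accumulator with its duplicated end-of-row flush by a run-splitting decomposition: each row is first mapped to glyphs, then scanned as maximal runs of empty/non-empty cells, each run emitted as a count or a joined fragment.
import Mathlib
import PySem

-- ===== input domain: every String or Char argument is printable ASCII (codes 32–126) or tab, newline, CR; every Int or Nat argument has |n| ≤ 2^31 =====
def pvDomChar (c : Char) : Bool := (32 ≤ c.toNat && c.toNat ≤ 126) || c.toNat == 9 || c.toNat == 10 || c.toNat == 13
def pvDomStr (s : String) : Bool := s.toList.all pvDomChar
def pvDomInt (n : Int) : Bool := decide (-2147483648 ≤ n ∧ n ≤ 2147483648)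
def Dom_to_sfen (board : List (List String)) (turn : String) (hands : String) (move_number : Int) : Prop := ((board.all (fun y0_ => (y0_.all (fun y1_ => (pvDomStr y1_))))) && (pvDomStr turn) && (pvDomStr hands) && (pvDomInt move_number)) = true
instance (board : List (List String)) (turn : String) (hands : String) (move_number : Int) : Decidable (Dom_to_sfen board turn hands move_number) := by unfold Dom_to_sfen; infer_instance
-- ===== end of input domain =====

-- B replaces A's empty_count accumulator (with its duplicated end-of-row flush) by a run-splitting
-- decomposition: map cells to glyphs, split each row into maximal empty/non-empty runs, emit each run.

-- shared constant: the SFEN_MAP dict of the module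
def sfenMap : PySem.Dict String String := PySem.Dict.ofList [
  ("K_black", "K"), ("R_black", "R"), ("B_black", "B"), ("G_black", "G"), ("S_black", "S"), ("N_black", "N"), ("L_black", "L"), ("P_black", "P"),
  ("+R_black", "+R"), ("+B_black", "+B"), ("+S_black", "+S"), ("+N_black", "+N"), ("+L_black", "+L"), ("+P_black", "+P"),
  ("K_white", "k"), ("R_white", "r"), ("B_white", "b"), ("G_white", "g"), ("S_white", "s"), ("N_white", "n"), ("L_white", "l"), ("P_white", "p"),
  ("+R_white", "+r"), ("+B_white", "+b"), ("+S_white", "+s"), ("+N_white", "+n"), ("+L_white", "+l"), ("+P_white", "+p"),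
  ("empty", "")]

-- ===== PORT A =====
def to_sfen (board : List (List String)) (turn : String) (hands : String) (move_number : Int) : String :=
  let sfen_rows := board.foldl (fun rows row =>
    let st := row.foldl (fun (st : String × Int) cell =>
        let piece := PySem.Dict.getD sfenMap cell ""
        if piece == "" then (st.1, st.2 + 1)
        else ((if st.2 > 0 then st.1 ++ PySem.Int.toStr st.2 else st.1) ++ piece, 0))
      ("", (0 : Int))
    rows ++ [if st.2 > 0 then st.1 ++ PySem.Int.toStr st.2 else st.1]) ([] : List String)
  let sfen := PySem.Str.join "/" sfen_rows
  sfen ++ " " ++ turn ++ " " ++ hands ++ " " ++ PySem.Int.toStr move_number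

-- ===== PORT B =====
-- run splitter of Source B's _row_str: the while loop over maximal runs, as recursion on the glyph list
def rowAlt : List String → String
  | [] => ""
  | g :: gs =>
    if g == "" then
      PySem.Int.toStr (1 + ((gs.takeWhile (fun x => x == "")).length : Int)) ++ rowAlt (gs.dropWhile (fun x => x == ""))
    else
      PySem.Str.join "" (g :: gs.takeWhile (fun x => x != "")) ++ rowAlt (gs.dropWhile (fun x => x != ""))
termination_by gs => gs.length
decreasing_by
  all_goals exact Nat.lt_succ_of_le (List.length_dropWhile_le _ _)

def to_sfen_alt (board : List (List String)) (turn : String) (hands : String) (move_number : Int) : String :=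
  let sfen := PySem.Str.join "/" (board.map (fun row => rowAlt (row.map (fun cell => PySem.Dict.getD sfenMap cell ""))))
  sfen ++ " " ++ turn ++ " " ++ hands ++ " " ++ PySem.Int.toStr move_number

-- ===== PRECONDITION & SPEC =====
def Spec_to_sfen (board : List (List String)) (turn : String) (hands : String) (move_number : Int) (out : String) : Prop := out = to_sfen_alt board turn hands move_number
instance (board : List (List String)) (turn : String) (hands : String) (move_number : Int) (out : String) : Decidable (Spec_to_sfen board turn hands move_number out) := by unfold Spec_to_sfen; infer_instance

-- ===== CLAIM (what is proved, stated in full; the proofs are below) =====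
def Claim_equal_to_sfen : Prop := ∀ (board : List (List String)) (turn : String) (hands : String) (move_number : Int), Dom_to_sfen board turn hands move_number → Spec_to_sfen board turn hands move_number (to_sfen board turn hands move_number)

-- ===== LEMMAS AND PROOFS =====

-- A's inner loop seen from a state (s, k): what it appends after s
def emitA : Int → List String → String
  | k, [] => if k > 0 then PySem.Int.toStr k else ""
  | k, g :: gs => if g == "" then emitA (k + 1) gs else (if k > 0 then PySem.Int.toStr k else "") ++ g ++ emitA 0 gs

lemma join_empty_cons (x : String) (xs : List String) :
    PySem.Str.join "" (x :: xs) = x ++ PySem.Str.join "" xs := by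
  simp [PySem.Str.join, PySem.Chars.join, List.intercalate]
  induction xs with
  | nil => simp
  | cons y ys ih => simp_all

lemma foldA_emit (gs : List String) : ∀ (s : String) (k : Int),
    (let st := gs.foldl (fun (st : String × Int) piece =>
        if piece == "" then (st.1, st.2 + 1)
        else ((if st.2 > 0 then st.1 ++ PySem.Int.toStr st.2 else st.1) ++ piece, 0)) (s, k)
     if st.2 > 0 then st.1 ++ PySem.Int.toStr st.2 else st.1) = s ++ emitA k gs := by
  induction gs with
  | nil =>
    intro s k
    simp only [List.foldl_nil, emitA]
    split_ifs <;> simp [String.append_empty]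
  | cons g gs ih =>
    intro s k
    simp only [List.foldl_cons, emitA]
    by_cases hg : g == ""
    · simp only [hg, ite_true]
      exact ih s (k + 1)
    · simp only [hg, Bool.false_eq_true, if_false]
      rw [ih]
      by_cases hk : k > 0 <;> simp [hk, String.append_assoc, String.empty_append]

lemma emit_pos (gs : List String) : ∀ (k : Int), 0 < k →
    emitA k gs = PySem.Int.toStr (k + ((gs.takeWhile (fun x => x == "")).length : Int))
      ++ emitA 0 (gs.dropWhile (fun x => x == "")) := by
  induction gs with
  | nil =>
    intro k hk
    simp [emitA, hk, String.append_empty]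
  | cons g gs ih =>
    intro k hk
    by_cases hg : g == ""
    · simp only [emitA, hg, ite_true, List.takeWhile_cons, List.dropWhile_cons]
      rw [ih (k + 1) (by omega)]
      simp only [List.length_cons]
      congr 1
      congr 1
      push_cast
      ring
    · simp only [emitA, hg, Bool.false_eq_true, ite_false, List.takeWhile_cons, List.dropWhile_cons]
      simp [hk, String.append_assoc]

lemma rowAlt_run (gs : List String) :
    rowAlt gs = PySem.Str.join "" (gs.takeWhile (fun x => x != "")) ++ rowAlt (gs.dropWhile (fun x => x != "")) := by
  cases gs with
  | nil => simp [rowAlt, PySem.Str.join, PySem.Chars.join, List.intercalate]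
  | cons g gs =>
    by_cases hg : g == ""
    · simp only [List.takeWhile_cons, List.dropWhile_cons, bne, hg, Bool.not_true,
        Bool.false_eq_true, if_false]
      simp [PySem.Str.join, PySem.Chars.join, List.intercalate, String.empty_append]
    · rw [rowAlt]
      simp only [Bool.false_eq_true, if_false, List.takeWhile_cons, List.dropWhile_cons, bne,
        hg, Bool.not_false, if_true]

lemma emit_rowAlt : ∀ (n : Nat) (gs : List String), gs.length ≤ n → emitA 0 gs = rowAlt gs := by
  intro n
  induction n with
  | zero =>
    intro gs h
    have : gs = [] := List.eq_nil_of_length_eq_zero (Nat.le_zero.mp h)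
    subst this
    simp [emitA, rowAlt]
  | succ n ih =>
    intro gs h
    cases gs with
    | nil => simp [emitA, rowAlt]
    | cons g gs =>
      by_cases hg : g == ""
      · rw [rowAlt]
        simp only [emitA, hg, ite_true]
        rw [show (0:Int) + 1 = 1 by ring, emit_pos gs 1 (by omega)]
        rw [ih (gs.dropWhile (fun x => x == ""))
          (le_trans (List.length_dropWhile_le _ _) (Nat.le_of_succ_le_succ h))]
      · rw [rowAlt]
        simp only [emitA, hg, Bool.false_eq_true, if_false]
        have h0 : ¬ ((0 : Int) > 0) := by omega
        rw [if_neg h0, String.empty_append]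
        rw [ih gs (Nat.le_of_succ_le_succ h)]
        rw [rowAlt_run gs, join_empty_cons, String.append_assoc]

lemma row_eq (row : List String) :
    (let st := row.foldl (fun (st : String × Int) cell =>
        let piece := PySem.Dict.getD sfenMap cell ""
        if piece == "" then (st.1, st.2 + 1)
        else ((if st.2 > 0 then st.1 ++ PySem.Int.toStr st.2 else st.1) ++ piece, 0))
      ("", (0 : Int))
     if st.2 > 0 then st.1 ++ PySem.Int.toStr st.2 else st.1)
    = rowAlt (row.map (fun cell => PySem.Dict.getD sfenMap cell "")) := by
  have hm := List.foldl_map (f := fun cell => PySem.Dict.getD sfenMap cell "")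
    (g := fun (st : String × Int) piece =>
        if piece == "" then (st.1, st.2 + 1)
        else ((if st.2 > 0 then st.1 ++ PySem.Int.toStr st.2 else st.1) ++ piece, 0))
    (l := row) (init := (("" : String), (0 : Int)))
  simp only []
  rw [← hm, foldA_emit, String.empty_append,
    emit_rowAlt (row.map (fun cell => PySem.Dict.getD sfenMap cell "")).length _ (le_refl _)]

-- ===== VERDICT (by name: the statement is the Claim_ definition above) =====
theorem to_sfen_spec : Claim_equal_to_sfen := by
  intro board turn hands move_number _
  unfold Spec_to_sfen to_sfen to_sfen_alt
  have hrows : board.foldl (fun rows row =>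
      let st := row.foldl (fun (st : String × Int) cell =>
          let piece := PySem.Dict.getD sfenMap cell ""
          if piece == "" then (st.1, st.2 + 1)
          else ((if st.2 > 0 then st.1 ++ PySem.Int.toStr st.2 else st.1) ++ piece, 0))
        ("", (0 : Int))
      rows ++ [if st.2 > 0 then st.1 ++ PySem.Int.toStr st.2 else st.1]) ([] : List String)
      = board.map (fun row => rowAlt (row.map (fun cell => PySem.Dict.getD sfenMap cell ""))) := by
    rw [PySem.List.foldl_append_singleton_eq_map]
    exact List.map_congr_left (fun row _ => row_eq row)
  simp only [hrows]
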